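-- pv_equiv track=rewrite | github.com/taektegi/2023_TGwinG_FE_kimtaeksoo | 4week_assignment.py | beerRefrigerator
-- ===== SOURCE A (Python) =====
-- def beerRefrigerator(n):
--     a=2
--     r=[1]
--     q=[]
--     b=[]
--     while n>=a:
--         if n%a==0:
--             r.append(a)
--             a+=1
--         else :
--             a+=1
--     for i in r:
--         for j in r:
--             for k in r:
--                 if i*j*k==n:
--                     q.append([i,j,k])
--                 else:
--                     pass
--     for i in q:
--         i[0],i[1],i[2]=int(i[0]), int(i[1]), int(i[2])
--         b.append((i[0]*i[1])+(i[1]*i[2])+(i[2]*i[0]))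
--     e=min(b)
--     for i in q:
--         if (i[0]*i[1])+(i[1]*i[2])+(i[2]*i[0])==e:
--             w=f'{i[0]} X {i[1]} X {i[2]}'
--
--     return w
-- ===== SOURCE B (Python) =====
-- def beerRefrigerator(n):
--     divs = set()
--     d = 1
--     while d * d <= n:
--         if n % d == 0:
--             divs.add(d)
--             divs.add(n // d)
--         d += 1
--     ds = sorted(divs)
--     best = None
--     for i in ds:
--         for j in ds:
--             if (n // i) % j == 0:
--                 k = n // (i * j)
--                 s = i * j + j * k + k * i
--                 if best is None or s <= best[0]:
--                     best = (s, i, j, k)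
--     return f'{best[1]} X {best[2]} X {best[3]}'
-- ===== Notes on version B (the rewrite author's own statement) =====
-- stated objective: faster
-- what changed: B finds all divisors by trial division up to sqrt(n) (adding both d and n//d) instead of scanning 2..n, and replaces A's cubic scan over all (i,j,k) divisor triples plus two further passes (min, then last-match) by a quadratic loop over divisor pairs that computes k = n//(i*j) directly and keeps the running minimum online (<= keeps A's last-of-the-minima tie-break).
-- outside the precondition, e.g. on beerRefrigerator(0): A raises ValueError, B raises TypeError
import Mathlib
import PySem

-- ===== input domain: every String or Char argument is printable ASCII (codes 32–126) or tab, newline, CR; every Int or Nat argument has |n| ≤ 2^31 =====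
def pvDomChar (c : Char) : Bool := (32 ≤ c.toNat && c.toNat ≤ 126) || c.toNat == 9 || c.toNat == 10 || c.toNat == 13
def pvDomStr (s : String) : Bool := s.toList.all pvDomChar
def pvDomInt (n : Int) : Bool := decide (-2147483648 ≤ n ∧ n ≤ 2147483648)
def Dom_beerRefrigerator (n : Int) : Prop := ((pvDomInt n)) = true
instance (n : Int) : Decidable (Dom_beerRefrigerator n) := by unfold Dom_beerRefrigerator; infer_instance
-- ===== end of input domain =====

-- B replaces A's O(n) divisor scan and cubic triple search by an O(√n) divisor sieve and a
-- quadratic two-divisor loop with an online minimum (objective: faster).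

-- ===== PORT A =====
-- 'while n>=a: if n%a==0: r.append(a); a+=1' is the loop 'for a in range(2, n+1)' appending divisors.
def beerRefrigerator (n : Int) : String :=
  let r : List Int :=
    (PySem.List.pyRange 2 (n + 1) 1).foldl
      (fun r a => if PySem.Int.mod n a == 0 then r ++ [a] else r) [1]
  let q : List (Int × Int × Int) :=
    r.foldl (fun q i =>
      r.foldl (fun q j =>
        r.foldl (fun q k =>
          if i * j * k == n then q ++ [(i, j, k)] else q) q) q) []
  -- the 'int(i[0]) …' line is the identity on ints and is omitted
  let b : List Int :=
    q.foldl (fun b t => b ++ [t.1 * t.2.1 + t.2.1 * t.2.2 + t.2.2 * t.1]) []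
  match PySem.List.min? b (fun x => x) with
  | none => ""          -- Python: min([]) raises ValueError (excluded by Pre_)
  | some e =>
    match q.foldl (fun w t =>
        if t.1 * t.2.1 + t.2.1 * t.2.2 + t.2.2 * t.1 == e then
          some (PySem.Int.toStr t.1 ++ " X " ++ PySem.Int.toStr t.2.1 ++ " X " ++
                PySem.Int.toStr t.2.2)
        else w) none with
    | some w => w
    | none => ""        -- Python: NameError on unbound w (unreachable: the minimum is attained)

-- ===== PORT B =====
-- 'd = 1; while d*d <= n: if n%d==0: divs.add(d); divs.add(n//d); d += 1' — fuel n.toNat+1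
-- bounds the count of iterations (the loop exits once d*d > n, and d ≤ n whenever d*d ≤ n, d ≥ 1).
def pvAltDivLoop (n : Int) : Nat → Int → PySem.Set Int → PySem.Set Int
  | 0, _, s => s
  | fuel + 1, d, s =>
    if d * d ≤ n then
      pvAltDivLoop n fuel (d + 1)
        (if PySem.Int.mod n d == 0 then
          PySem.Set.add (PySem.Set.add s d) (PySem.Int.floordiv n d)
        else s)
    else s

def beerRefrigerator_alt (n : Int) : String :=
  let ds : List Int :=
    PySem.List.sorted (pvAltDivLoop n (n.toNat + 1) 1 PySem.Set.empty) (fun x => x) false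
  let best : Option (Int × Int × Int × Int) :=
    ds.foldl (fun best i =>
      ds.foldl (fun best j =>
        if PySem.Int.mod (PySem.Int.floordiv n i) j == 0 then
          let k := PySem.Int.floordiv n (i * j)
          let s := i * j + j * k + k * i
          match best with
          | none => some (s, i, j, k)
          | some (bs, _, _, _) => if s ≤ bs then some (s, i, j, k) else best
        else best) best) none
  match best with
  | none => ""          -- Python: subscripting None raises TypeError (unreachable for n ≥ 1)
  | some (_, i, j, k) =>
      PySem.Int.toStr i ++ " X " ++ PySem.Int.toStr j ++ " X " ++ PySem.Int.toStr k

-- ===== PRECONDITION & SPEC =====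
-- Pre_ excludes exactly the inputs where the Python A raises: for n ≤ 0 no factor triple exists,
-- so A's 'min(b)' is min([]) and raises ValueError.
def Pre_beerRefrigerator (n : Int) : Prop := 1 ≤ n
instance (n : Int) : Decidable (Pre_beerRefrigerator n) := by unfold Pre_beerRefrigerator; infer_instance
def pvWitness_beerRefrigerator : Int := (8)

def Spec_beerRefrigerator (n : Int) (out : String) : Prop := out = beerRefrigerator_alt n
instance (n : Int) (out : String) : Decidable (Spec_beerRefrigerator n out) := by unfold Spec_beerRefrigerator; infer_instance

-- ===== CLAIM (what is proved, stated in full; the proofs are below) =====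
def Claim_equal_beerRefrigerator : Prop := ∀ (n : Int), Dom_beerRefrigerator n → Pre_beerRefrigerator n → Spec_beerRefrigerator n (beerRefrigerator n)

-- ===== LEMMAS AND PROOFS =====

theorem pvAltDivLoop_mem (n : Int) (fuel : Nat) :
    ∀ (d : Int) (s : PySem.Set Int) (x : Int), 1 ≤ d → n < d + fuel →
    (x ∈ pvAltDivLoop n fuel d s ↔
      x ∈ s ∨ ∃ c : Int, d ≤ c ∧ c * c ≤ n ∧ c ∣ n ∧ (x = c ∨ x = PySem.Int.floordiv n c)) := by
  induction fuel with
  | zero =>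
    intro d s x hd hbig
    simp only [pvAltDivLoop]
    constructor
    · exact Or.inl
    · rintro (h | ⟨c, hdc, hcc, _, _⟩)
      · exact h
      · have hc1 : 1 ≤ c := le_trans hd hdc
        have hcc' : c ≤ c * c := by nlinarith
        simp only [Nat.cast_zero, add_zero] at hbig
        linarith
  | succ fuel ih =>
    intro d s x hd hbig
    simp only [pvAltDivLoop]
    by_cases hdd : d * d ≤ n
    · rw [if_pos hdd]
      rw [ih (d+1) _ x (by omega) (by omega)]
      by_cases hmod : PySem.Int.mod n d == 0
      · have hdvd : d ∣ n := PySem.Int.mod_eq_zero_iff_dvd n d |>.1 (by simpa using hmod)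
        rw [if_pos hmod]
        simp only [PySem.Set.mem_add]
        constructor
        · rintro (((hs | hxd) | hxnd) | ⟨c, h1, h2, h3, h4⟩)
          · exact Or.inl hs
          · exact Or.inr ⟨d, le_refl _, hdd, hdvd, Or.inl hxd⟩
          · exact Or.inr ⟨d, le_refl _, hdd, hdvd, Or.inr hxnd⟩
          · exact Or.inr ⟨c, by omega, h2, h3, h4⟩
        · rintro (hs | ⟨c, h1, h2, h3, h4⟩)
          · exact Or.inl (Or.inl (Or.inl hs))
          · rcases eq_or_lt_of_le h1 with rfl | h
            · rcases h4 with hx | hx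
              · exact Or.inl (Or.inl (Or.inr hx))
              · exact Or.inl (Or.inr hx)
            · exact Or.inr ⟨c, by omega, h2, h3, h4⟩
      · rw [if_neg hmod]
        constructor
        · rintro (hs | ⟨c, h1, h2, h3, h4⟩)
          · exact Or.inl hs
          · exact Or.inr ⟨c, by omega, h2, h3, h4⟩
        · rintro (hs | ⟨c, h1, h2, h3, h4⟩)
          · exact Or.inl hs
          · rcases eq_or_lt_of_le h1 with rfl | h
            · exact absurd ((PySem.Int.mod_eq_zero_iff_dvd _ _).2 h3) (by simpa using hmod)
            · exact Or.inr ⟨c, by omega, h2, h3, h4⟩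
    · rw [if_neg hdd]
      constructor
      · exact Or.inl
      · rintro (hs | ⟨c, h1, h2, _, _⟩)
        · exact hs
        · have : d * d ≤ c * c := mul_le_mul h1 h1 (by omega) (by omega)
          linarith


theorem pvFloordiv_exact (a b q : Int) (hb : 0 < b) (h : a = q * b) :
    PySem.Int.floordiv a b = q := by
  rw [PySem.Int.floordiv_eq_iff_of_pos hb]
  constructor
  · omega
  · nlinarith

theorem pvAltDivLoop_nodup (n : Int) (fuel : Nat) :
    ∀ (d : Int) (s : PySem.Set Int), s.Nodup → (pvAltDivLoop n fuel d s).Nodup := by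
  induction fuel with
  | zero => intro d s hs; simpa [pvAltDivLoop] using hs
  | succ fuel ih =>
    intro d s hs
    simp only [pvAltDivLoop]
    split
    · apply ih
      split
      · exact PySem.Set.nodup_add _ _ (PySem.Set.nodup_add _ _ hs)
      · exact hs
    · exact hs

theorem pvS_mem (n : Int) (hn : 1 ≤ n) (x : Int) :
    x ∈ pvAltDivLoop n (n.toNat + 1) 1 PySem.Set.empty ↔ 1 ≤ x ∧ x ≤ n ∧ x ∣ n := by
  rw [pvAltDivLoop_mem n (n.toNat + 1) 1 PySem.Set.empty x (le_refl 1) (by omega)]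
  simp only [PySem.Set.empty, List.not_mem_nil, false_or]
  constructor
  · rintro ⟨c, h1, h2, h3, (hx | hx)⟩
    · subst hx
      have : x ≤ x * x := by nlinarith
      exact ⟨h1, by omega, h3⟩
    · subst hx
      obtain ⟨e, he⟩ := h3
      have hfd : PySem.Int.floordiv n c = e := pvFloordiv_exact n c e (by omega) (by rw [he]; ring)
      rw [hfd]
      have he1 : 1 ≤ e := by nlinarith
      have : e ≤ e * c := by nlinarith
      exact ⟨he1, by nlinarith, ⟨c, by rw [he]; ring⟩⟩
  · rintro ⟨h1, h2, h3⟩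
    by_cases hxx : x * x ≤ n
    · exact ⟨x, h1, hxx, h3, Or.inl rfl⟩
    · obtain ⟨e, he⟩ := h3
      have he1 : 1 ≤ e := by nlinarith
      refine ⟨e, he1, by nlinarith, ⟨x, by rw [he]; ring⟩, Or.inr ?_⟩
      exact (pvFloordiv_exact n e x (by omega) he).symm


def pvDivs (n : Int) : List Int :=
  [1] ++ (PySem.List.pyRange 2 (n + 1) 1).filter (fun a => PySem.Int.mod n a == 0)

theorem pvDivs_mem (n : Int) (hn : 1 ≤ n) (x : Int) :
    x ∈ pvDivs n ↔ 1 ≤ x ∧ x ≤ n ∧ x ∣ n := by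
  simp only [pvDivs, List.cons_append, List.nil_append, List.mem_cons, List.mem_filter,
    PySem.List.mem_pyRange_one, beq_iff_eq, PySem.Int.mod_eq_zero_iff_dvd]
  constructor
  · rintro (rfl | ⟨⟨h2, h3⟩, hd⟩)
    · exact ⟨le_refl _, hn, one_dvd n⟩
    · exact ⟨by omega, by omega, hd⟩
  · rintro ⟨h1, h2, hd⟩
    rcases eq_or_lt_of_le h1 with rfl | h
    · exact Or.inl rfl
    · exact Or.inr ⟨⟨by omega, by omega⟩, hd⟩

theorem pvDivs_pairwise (n : Int) : (pvDivs n).Pairwise (· < ·) := by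
  simp only [pvDivs, List.cons_append, List.nil_append, List.pairwise_cons]
  constructor
  · intro a ha
    have := (PySem.List.mem_pyRange_one).1 (List.mem_of_mem_filter ha)
    omega
  · exact (PySem.List.pairwise_lt_pyRange_one 2 (n+1)).filter _

theorem pvSorted_eq (n : Int) (hn : 1 ≤ n) :
    PySem.List.sorted (pvAltDivLoop n (n.toNat + 1) 1 PySem.Set.empty) (fun x => x) false
      = pvDivs n := by
  have hSnd : (pvAltDivLoop n (n.toNat + 1) 1 PySem.Set.empty).Nodup :=
    pvAltDivLoop_nodup n _ 1 PySem.Set.empty List.nodup_nil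
  have hDnd : (pvDivs n).Nodup := (pvDivs_pairwise n).imp ne_of_lt
  have hperm : (PySem.List.sorted (pvAltDivLoop n (n.toNat + 1) 1 PySem.Set.empty)
      (fun x => x) false).Perm (pvDivs n) := by
    refine (PySem.List.sorted_perm _ _ _).trans ?_
    rw [List.perm_ext_iff_of_nodup hSnd hDnd]
    intro a
    rw [pvS_mem n hn a, pvDivs_mem n hn a]
  exact PySem.List.eq_of_perm_of_pairwise_le_of_injective (fun x => x) (fun _ _ h => h) hperm
    (PySem.List.sorted_pairwise _ _) ((pvDivs_pairwise n).imp le_of_lt)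


theorem pvFilter_singleton {l : List Int} {a : Int} {p : Int → Bool}
    (hnd : l.Nodup) (ha : a ∈ l) (h : ∀ x ∈ l, p x = true ↔ x = a) :
    l.filter p = [a] := by
  induction l with
  | nil => cases ha
  | cons y ys ih =>
    rcases List.mem_cons.1 ha with rfl | hays
    · rw [List.filter_cons_of_pos ((h _ List.mem_cons_self).2 rfl)]
      have : ys.filter p = [] := by
        rw [List.filter_eq_nil_iff]
        intro x hx hpx
        exact (List.nodup_cons.1 hnd).1 (((h x (List.mem_cons_of_mem _ hx)).1 hpx) ▸ hx)
      rw [this]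
    · rw [List.filter_cons_of_neg, ih (List.nodup_cons.1 hnd).2 hays
        (fun x hx => h x (List.mem_cons_of_mem _ hx))]
      intro hpy
      exact (List.nodup_cons.1 hnd).1 (((h _ List.mem_cons_self).1 hpy) ▸ hays)

theorem pvInner (n i j : Int) (hn : 1 ≤ n) (hi : i ∈ pvDivs n) (hj : j ∈ pvDivs n) :
    ((pvDivs n).filter (fun k => i * j * k == n)).map (fun k => (i, j, k)) =
      (if PySem.Int.mod (PySem.Int.floordiv n i) j == 0 then
        [(i, j, PySem.Int.floordiv n (i * j))]
      else []) := by
  obtain ⟨hi1, hi2, u, hu⟩ := (pvDivs_mem n hn i).1 hi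
  obtain ⟨hj1, hj2, w, hw⟩ := (pvDivs_mem n hn j).1 hj
  have hfd : PySem.Int.floordiv n i = u := pvFloordiv_exact n i u (by omega) (by rw [hu]; ring)
  rw [hfd]
  by_cases hdvd : j ∣ u
  · obtain ⟨v, hv⟩ := hdvd
    have hij1 : 1 ≤ i * j := by nlinarith
    have hnv : n = i * j * v := by rw [hu, hv]; ring
    have hv1 : 1 ≤ v := by nlinarith
    have hvn : v ≤ n := by nlinarith [mul_le_mul_of_nonneg_left hij1 (by omega : (0:ℤ) ≤ v)]
    have hk0 : PySem.Int.floordiv n (i * j) = v :=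
      pvFloordiv_exact n (i * j) v (by nlinarith) (by rw [hu, hv]; ring)
    rw [if_pos (by simp [PySem.Int.mod_eq_zero_iff_dvd, hv])]
    rw [hk0]
    rw [pvFilter_singleton ((pvDivs_pairwise n).imp ne_of_lt)
        ((pvDivs_mem n hn v).2 ⟨hv1, hvn, ⟨i * j, by rw [hu, hv]; ring⟩⟩)
        (fun x _ => by
          simp only [beq_iff_eq]
          constructor
          · intro hx
            have : i * j * x = i * j * v := by rw [hx, hu, hv]; ring
            exact mul_left_cancel₀ (by positivity) this
          · rintro rfl; rw [hu, hv]; ring)]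
    simp
  · rw [if_neg (by simpa [PySem.Int.mod_eq_zero_iff_dvd] using hdvd)]
    rw [List.filter_eq_nil_iff.2, List.map_nil]
    intro x hx hpx
    apply hdvd
    have hx' : i * j * x = n := by simpa using hpx
    refine ⟨x, mul_left_cancel₀ (by omega : i ≠ 0) ?_⟩
    rw [hu] at hx'
    linear_combination -hx'


def pvSum (t : Int × Int × Int) : Int := t.1 * t.2.1 + t.2.1 * t.2.2 + t.2.2 * t.1
def pvFmt (t : Int × Int × Int) : String :=
  PySem.Int.toStr t.1 ++ " X " ++ PySem.Int.toStr t.2.1 ++ " X " ++ PySem.Int.toStr t.2.2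
def pvStep (best : Option (Int × Int × Int × Int)) (t : Int × Int × Int) :
    Option (Int × Int × Int × Int) :=
  match best with
  | none => some (pvSum t, t)
  | some (bs, b) => if pvSum t ≤ bs then some (pvSum t, t) else some (bs, b)
def pvSel : Int → (Int × Int × Int) → List (Int × Int × Int) → Int × (Int × Int × Int)
  | m, t, [] => (m, t)
  | m, t, x :: rest => if pvSum x ≤ m then pvSel (pvSum x) x rest else pvSel m t rest

theorem pvSel_foldl (rest : List (Int × Int × Int)) : ∀ (m : Int) (t : Int × Int × Int),
    rest.foldl pvStep (some (m, t)) = some (pvSel m t rest) := by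
  induction rest with
  | nil => intro m t; rfl
  | cons x xs ih =>
    intro m t
    simp only [List.foldl_cons, pvStep, pvSel]
    split_ifs with h
    · exact ih _ _
    · exact ih _ _

theorem pvSel_fst (rest : List (Int × Int × Int)) : ∀ (m : Int) (t : Int × Int × Int),
    (pvSel m t rest).1 = (rest.map pvSum).foldl min m := by
  induction rest with
  | nil => intro m t; rfl
  | cons x xs ih =>
    intro m t
    simp only [pvSel, List.map_cons, List.foldl_cons]
    split_ifs with h
    · rw [ih, min_eq_right h]
    · rw [ih, min_eq_left (by omega)]

theorem pvSel_fst_le (rest : List (Int × Int × Int)) (m : Int) (t : Int × Int × Int) :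
    (pvSel m t rest).1 ≤ m := by
  rw [pvSel_fst]
  exact (PySem.List.foldl_min_le _ _).1

theorem pvLastPick (rest : List (Int × Int × Int)) :
    ∀ (m : Int) (t : Int × Int × Int) (e : Int) (w0 : Option String),
    e = (pvSel m t rest).1 → (m = e → w0 = some (pvFmt t)) →
    rest.foldl (fun w x => if pvSum x == e then some (pvFmt x) else w) w0 =
      some (pvFmt (pvSel m t rest).2) := by
  induction rest with
  | nil =>
    intro m t e w0 he hw0
    exact hw0 he.symm
  | cons x xs ih =>
    intro m t e w0 he hw0
    simp only [pvSel] at he ⊢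
    rw [List.foldl_cons]
    by_cases h : pvSum x ≤ m
    · rw [if_pos h] at he ⊢
      exact ih (pvSum x) x e _ he (fun hx => by rw [if_pos (by simpa using hx)])
    · rw [if_neg h] at he ⊢
      have hlt : e < pvSum x := lt_of_le_of_lt (he ▸ pvSel_fst_le xs m t) (by omega)
      rw [show (if (pvSum x == e) = true then some (pvFmt x) else w0) = w0 by
        rw [if_neg (by simp; omega)]]
      exact ih m t e w0 he hw0


def pvQ (n : Int) : List (Int × Int × Int) :=
  (pvDivs n).flatMap (fun i =>
    (pvDivs n).flatMap (fun j =>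
      if PySem.Int.mod (PySem.Int.floordiv n i) j == 0 then
        [(i, j, PySem.Int.floordiv n (i * j))]
      else []))
def pvAnswer (n : Int) : String :=
  match pvQ n with
  | [] => ""
  | x :: rest => pvFmt (pvSel (pvSum x) x rest).2

theorem pvA_eq (n : Int) (hn : 1 ≤ n) : beerRefrigerator n = pvAnswer n := by
  unfold beerRefrigerator
  rw [PySem.List.foldl_append_if_eq_filter]
  simp only [PySem.List.foldl_append_if, PySem.List.foldl_append_eq_flatMap,
    List.nil_append, ← List.map_eq_flatMap]
  have hdiv : [1] ++ (PySem.List.pyRange 2 (n + 1) 1).filter (fun a => PySem.Int.mod n a == 0)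
      = pvDivs n := rfl
  rw [hdiv]
  rw [List.flatMap_congr (fun i hi => List.flatMap_congr (fun j hj => pvInner n i j hn hi hj))]
  rw [show ((pvDivs n).flatMap fun i =>
      (pvDivs n).flatMap fun j =>
        if PySem.Int.mod (PySem.Int.floordiv n i) j == 0 then
          [(i, j, PySem.Int.floordiv n (i * j))]
        else []) = pvQ n from rfl]
  cases hpv : pvQ n with
  | nil => simp [pvAnswer, hpv, PySem.List.min?]
  | cons x rest =>
    simp only [List.map_cons]
    rw [show (fun t : Int × Int × Int => t.1 * t.2.1 + t.2.1 * t.2.2 + t.2.2 * t.1) = pvSum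
      from rfl]
    rw [PySem.List.min?_id_cons]
    show (match List.foldl
        (fun w t => if (pvSum t == List.foldl min (pvSum x) (List.map pvSum rest)) = true then
          some (pvFmt t) else w) none (x :: rest) with
      | some w => w
      | none => "") = pvAnswer n
    rw [List.foldl_cons]
    rw [pvLastPick rest (pvSum x) x (List.foldl min (pvSum x) (List.map pvSum rest)) _
      (pvSel_fst rest (pvSum x) x).symm
      (fun hx => by rw [if_pos (by simpa using hx)])]
    simp [pvAnswer, hpv]


theorem pvFlatMapIte {α : Type} (L : List Int) (p : Int → Bool) (g : Int → α) :
    L.flatMap (fun j => if p j then [g j] else []) = (L.filter p).map g := by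
  induction L with
  | nil => rfl
  | cons y ys ih =>
    by_cases h : p y
    · rw [List.flatMap_cons, List.filter_cons_of_pos h, List.map_cons, if_pos h, ← ih]
      rfl
    · rw [List.flatMap_cons, List.filter_cons_of_neg h, if_neg h, ← ih]
      rfl

theorem pvB_eq (n : Int) (hn : 1 ≤ n) : beerRefrigerator_alt n = pvAnswer n := by
  unfold beerRefrigerator_alt
  rw [pvSorted_eq n hn]
  have hbody : ∀ i : Int,
      (fun (best : Option (Int × Int × Int × Int)) (j : Int) =>
        if PySem.Int.mod (PySem.Int.floordiv n i) j == 0 then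
          let k := PySem.Int.floordiv n (i * j)
          let s := i * j + j * k + k * i
          match best with
          | none => some (s, i, j, k)
          | some (bs, _, _, _) => if s ≤ bs then some (s, i, j, k) else best
        else best) =
      (fun best j =>
        if PySem.Int.mod (PySem.Int.floordiv n i) j == 0 then
          pvStep best (i, j, PySem.Int.floordiv n (i * j))
        else best) := by
    intro i
    funext best j
    cases best with
    | none => rfl
    | some b => rcases b with ⟨bs, bi, bj, bk⟩; rfl
  have houter :
      (fun (best : Option (Int × Int × Int × Int)) (i : Int) =>
        (pvDivs n).foldl (fun best j =>
          if PySem.Int.mod (PySem.Int.floordiv n i) j == 0 then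
            pvStep best (i, j, PySem.Int.floordiv n (i * j))
          else best) best) =
      (fun best i =>
        (((pvDivs n).filter (fun j => PySem.Int.mod (PySem.Int.floordiv n i) j == 0)).map
          (fun j => (i, j, PySem.Int.floordiv n (i * j)))).foldl pvStep best) := by
    funext best i
    rw [PySem.List.foldl_if_eq_foldl_filter, List.foldl_map]
  simp only [hbody, houter]
  rw [show (fun (best : Option (Int × Int × Int × Int)) (i : Int) =>
        (((pvDivs n).filter (fun j => PySem.Int.mod (PySem.Int.floordiv n i) j == 0)).map
          (fun j => (i, j, PySem.Int.floordiv n (i * j)))).foldl pvStep best) =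
      (fun best i =>
        ((pvDivs n).flatMap (fun j =>
          if PySem.Int.mod (PySem.Int.floordiv n i) j == 0 then
            [(i, j, PySem.Int.floordiv n (i * j))]
          else [])).foldl pvStep best) from by
    funext best i
    rw [pvFlatMapIte]]
  rw [← List.foldl_flatMap]
  rw [show ((pvDivs n).flatMap fun i =>
      (pvDivs n).flatMap fun j =>
        if PySem.Int.mod (PySem.Int.floordiv n i) j == 0 then
          [(i, j, PySem.Int.floordiv n (i * j))]
        else []) = pvQ n from rfl]
  cases hpv : pvQ n with
  | nil => simp [pvAnswer, hpv]
  | cons x rest =>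
    rw [List.foldl_cons]
    rw [show pvStep none x = some (pvSum x, x) from rfl]
    rw [pvSel_foldl rest (pvSum x) x]
    rcases hsel : pvSel (pvSum x) x rest with ⟨m, ti, tj, tk⟩
    simp [pvAnswer, hpv, hsel, pvFmt]

-- ===== VERDICT (by name: the statement is the Claim_ definition above) =====
theorem beerRefrigerator_spec : Claim_equal_beerRefrigerator := by
  intro n _ hpre
  unfold Spec_beerRefrigerator
  rw [pvA_eq n hpre, pvB_eq n hpre]
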